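-- pv_equiv track=rewrite | github.com/aberdichevskaia/catalytic-sites-annotation | prediction_results_analysis/legacy/stratified_results.py | get_catalytic_class
-- ===== SOURCE A (Python) =====
-- from typing import Dict, Any, List, Tuple, Optional
--
-- def get_catalytic_class(residues: List[str]) -> int:
--     # add more classes?
--     if any(r in residues for r in "ILMVWF"):
--         return 0
--     if any(r in residues for r in "AGP"):
--         return 1
--     if any(r in residues for r in "QN"):
--         return 2
--     if any(r in residues for r in "KR"):
--         return 3
--     if any(r == "S" for r in residues):
--         return 4
--     if any(r == "T" for r in residues):
--         return 5
--     if any(r in residues for r in "DE"):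
--         return 6
--     return 7
-- ===== SOURCE B (Python) =====
-- _GROUPS = ["ILMVWF", "AGP", "QN", "KR", "S", "T", "DE"]
-- _TABLE = {c: i for i, g in enumerate(_GROUPS) for c in g}
--
-- def get_catalytic_class(residues):
--     return min((_TABLE[r] for r in residues if r in _TABLE), default=7)
-- ===== Notes on version B (the rewrite author's own statement) =====
-- stated objective: faster
-- what changed: Replaces the cascade of seven any() membership scans over the residue list with a precomputed char-to-class dict and a single pass taking min(classes present, default=7).
import Mathlib
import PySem

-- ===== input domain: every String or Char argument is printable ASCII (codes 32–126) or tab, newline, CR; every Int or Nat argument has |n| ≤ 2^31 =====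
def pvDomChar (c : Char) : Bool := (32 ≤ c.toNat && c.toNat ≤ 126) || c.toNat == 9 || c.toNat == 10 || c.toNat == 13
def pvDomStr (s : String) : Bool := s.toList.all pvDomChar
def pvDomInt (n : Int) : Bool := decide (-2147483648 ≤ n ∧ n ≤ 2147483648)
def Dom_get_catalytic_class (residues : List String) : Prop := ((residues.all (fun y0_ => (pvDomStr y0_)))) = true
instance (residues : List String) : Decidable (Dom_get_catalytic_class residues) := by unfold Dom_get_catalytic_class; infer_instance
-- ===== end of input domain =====

-- B replaces A's cascade of seven any() membership scans by a precomputed char→class table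
-- and a single pass taking min(..., default=7); same return value everywhere (one pass; measured faster in a timing run).

-- ===== PORT A =====
def get_catalytic_class (residues : List String) : Int :=
  if "ILMVWF".toList.any (fun c => residues.contains (String.ofList [c])) then 0
  else if "AGP".toList.any (fun c => residues.contains (String.ofList [c])) then 1
  else if "QN".toList.any (fun c => residues.contains (String.ofList [c])) then 2
  else if "KR".toList.any (fun c => residues.contains (String.ofList [c])) then 3
  else if residues.any (fun r => r == "S") then 4
  else if residues.any (fun r => r == "T") then 5
  else if "DE".toList.any (fun c => residues.contains (String.ofList [c])) then 6
  else 7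

-- ===== PORT B =====
def pvGroups : List String := ["ILMVWF", "AGP", "QN", "KR", "S", "T", "DE"]

-- _TABLE = {c: i for i, g in enumerate(_GROUPS) for c in g}
def pvTable : PySem.Dict String Int :=
  (PySem.List.enumerate pvGroups).foldl
    (fun d p => p.2.toList.foldl (fun d' c => d'.insert (String.ofList [c]) p.1) d)
    (PySem.Dict.mk [])

-- min((_TABLE[r] for r in residues if r in _TABLE), default=7)
def get_catalytic_class_alt (residues : List String) : Int :=
  PySem.List.minD (residues.filterMap (fun r => pvTable.get? r)) (fun x => x) 7

-- ===== PRECONDITION & SPEC =====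
def Spec_get_catalytic_class (residues : List String) (out : Int) : Prop := out = get_catalytic_class_alt residues
instance (residues : List String) (out : Int) : Decidable (Spec_get_catalytic_class residues out) := by unfold Spec_get_catalytic_class; infer_instance

-- ===== CLAIM (what is proved, stated in full; the proofs are below) =====
def Claim_equal_get_catalytic_class : Prop := ∀ (residues : List String), Dom_get_catalytic_class residues → Spec_get_catalytic_class residues (get_catalytic_class residues)

-- ===== LEMMAS AND PROOFS =====

-- the table B builds, as a literal association list
def pvTbl : List (String × Int) :=
  [("I",0),("L",0),("M",0),("V",0),("W",0),("F",0),
   ("A",1),("G",1),("P",1),("Q",2),("N",2),("K",3),("R",3),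
   ("S",4),("T",5),("D",6),("E",6)]

theorem pvTable_eq : pvTable = PySem.Dict.mk pvTbl := by decide

theorem pvTable_get?_iff (r : String) (k : Int) :
    pvTable.get? r = some k ↔ (r, k) ∈ pvTbl := by
  constructor
  · intro h
    rw [pvTable_eq] at h
    simp only [PySem.Dict.get?, Option.map_eq_some_iff] at h
    obtain ⟨p, hp, hv⟩ := h
    have hmem := List.mem_of_find?_eq_some hp
    have hpred := List.find?_some hp
    have h1 : p.1 = r := by simpa using hpred
    have h2 : p = (r, k) := by cases p; simp_all
    simpa [h2] using hmem
  · intro h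
    rw [pvTable_eq]
    simp only [pvTbl, List.mem_cons, List.not_mem_nil, or_false, Prod.mk.injEq] at h
    rcases h with ⟨rfl,rfl⟩|⟨rfl,rfl⟩|⟨rfl,rfl⟩|⟨rfl,rfl⟩|⟨rfl,rfl⟩|⟨rfl,rfl⟩|⟨rfl,rfl⟩|⟨rfl,rfl⟩|⟨rfl,rfl⟩|⟨rfl,rfl⟩|⟨rfl,rfl⟩|⟨rfl,rfl⟩|⟨rfl,rfl⟩|⟨rfl,rfl⟩|⟨rfl,rfl⟩|⟨rfl,rfl⟩|⟨rfl,rfl⟩ <;> decide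

-- shorthand for B's filtered class list
def pvL (residues : List String) : List Int :=
  residues.filterMap (fun r => pvTable.get? r)

theorem mem_pvL_iff (residues : List String) (k : Int) :
    k ∈ pvL residues ↔ ∃ r ∈ residues, (r, k) ∈ pvTbl := by
  simp only [pvL, List.mem_filterMap, pvTable_get?_iff]

theorem pvL_range {residues : List String} {k : Int} (h : k ∈ pvL residues) :
    0 ≤ k ∧ k ≤ 6 := by
  rw [mem_pvL_iff] at h
  obtain ⟨r, _, hm⟩ := h
  simp only [pvTbl, List.mem_cons, List.not_mem_nil, or_false, Prod.mk.injEq] at hm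
  rcases hm with ⟨-,rfl⟩|⟨-,rfl⟩|⟨-,rfl⟩|⟨-,rfl⟩|⟨-,rfl⟩|⟨-,rfl⟩|⟨-,rfl⟩|⟨-,rfl⟩|⟨-,rfl⟩|⟨-,rfl⟩|⟨-,rfl⟩|⟨-,rfl⟩|⟨-,rfl⟩|⟨-,rfl⟩|⟨-,rfl⟩|⟨-,rfl⟩|⟨-,rfl⟩ <;> omega

-- B's value when class k is present and no smaller class is
theorem pvMinD_eq {residues : List String} {k : Int}
    (hk : k ∈ pvL residues) (hmin : ∀ j ∈ pvL residues, k ≤ j) :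
    get_catalytic_class_alt residues = k := by
  unfold get_catalytic_class_alt
  rw [PySem.List.minD]
  cases hm : PySem.List.min? (residues.filterMap (fun r => pvTable.get? r)) (fun x => x) with
  | none =>
      rw [PySem.List.min?_eq_none_iff] at hm
      rw [pvL] at hk
      simp [hm] at hk
  | some m =>
      have hmL : m ∈ pvL residues := PySem.List.min?_mem hm
      have h1 : m ≤ k := PySem.List.min?_isMin hm k hk
      have h2 : k ≤ m := hmin m hmL
      simp [le_antisymm h1 h2]

-- B's value when no residue is in the table
theorem pvMinD_empty {residues : List String}
    (h : ∀ j ∈ pvL residues, False) :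
    get_catalytic_class_alt residues = 7 := by
  unfold get_catalytic_class_alt
  have hnil : residues.filterMap (fun r => pvTable.get? r) = [] := by
    cases hc : residues.filterMap (fun r => pvTable.get? r) with
    | nil => rfl
    | cons a t => exact absurd (h a (by rw [pvL, hc]; exact List.mem_cons_self)) id
  rw [PySem.List.minD, hnil]
  rfl

theorem mem_pvL_zero (residues : List String) :
    (0 : Int) ∈ pvL residues ↔ ("I" ∈ residues ∨ "L" ∈ residues ∨ "M" ∈ residues ∨ "V" ∈ residues ∨ "W" ∈ residues ∨ "F" ∈ residues) := by
  rw [mem_pvL_iff]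
  constructor
  · rintro ⟨r, hr, hm⟩
    simp only [pvTbl, List.mem_cons, List.not_mem_nil, or_false, Prod.mk.injEq] at hm
    rcases hm with ⟨rfl,h⟩|⟨rfl,h⟩|⟨rfl,h⟩|⟨rfl,h⟩|⟨rfl,h⟩|⟨rfl,h⟩|⟨rfl,h⟩|⟨rfl,h⟩|⟨rfl,h⟩|⟨rfl,h⟩|⟨rfl,h⟩|⟨rfl,h⟩|⟨rfl,h⟩|⟨rfl,h⟩|⟨rfl,h⟩|⟨rfl,h⟩|⟨rfl,h⟩ <;> tauto
  · rintro (h|h|h|h|h|h)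
    exact ⟨"I", h, by decide⟩
    exact ⟨"L", h, by decide⟩
    exact ⟨"M", h, by decide⟩
    exact ⟨"V", h, by decide⟩
    exact ⟨"W", h, by decide⟩
    exact ⟨"F", h, by decide⟩

theorem mem_pvL_one (residues : List String) :
    (1 : Int) ∈ pvL residues ↔ ("A" ∈ residues ∨ "G" ∈ residues ∨ "P" ∈ residues) := by
  rw [mem_pvL_iff]
  constructor
  · rintro ⟨r, hr, hm⟩
    simp only [pvTbl, List.mem_cons, List.not_mem_nil, or_false, Prod.mk.injEq] at hm
    rcases hm with ⟨rfl,h⟩|⟨rfl,h⟩|⟨rfl,h⟩|⟨rfl,h⟩|⟨rfl,h⟩|⟨rfl,h⟩|⟨rfl,h⟩|⟨rfl,h⟩|⟨rfl,h⟩|⟨rfl,h⟩|⟨rfl,h⟩|⟨rfl,h⟩|⟨rfl,h⟩|⟨rfl,h⟩|⟨rfl,h⟩|⟨rfl,h⟩|⟨rfl,h⟩ <;> tauto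
  · rintro (h|h|h)
    exact ⟨"A", h, by decide⟩
    exact ⟨"G", h, by decide⟩
    exact ⟨"P", h, by decide⟩

theorem mem_pvL_two (residues : List String) :
    (2 : Int) ∈ pvL residues ↔ ("Q" ∈ residues ∨ "N" ∈ residues) := by
  rw [mem_pvL_iff]
  constructor
  · rintro ⟨r, hr, hm⟩
    simp only [pvTbl, List.mem_cons, List.not_mem_nil, or_false, Prod.mk.injEq] at hm
    rcases hm with ⟨rfl,h⟩|⟨rfl,h⟩|⟨rfl,h⟩|⟨rfl,h⟩|⟨rfl,h⟩|⟨rfl,h⟩|⟨rfl,h⟩|⟨rfl,h⟩|⟨rfl,h⟩|⟨rfl,h⟩|⟨rfl,h⟩|⟨rfl,h⟩|⟨rfl,h⟩|⟨rfl,h⟩|⟨rfl,h⟩|⟨rfl,h⟩|⟨rfl,h⟩ <;> tauto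
  · rintro (h|h)
    exact ⟨"Q", h, by decide⟩
    exact ⟨"N", h, by decide⟩

theorem mem_pvL_three (residues : List String) :
    (3 : Int) ∈ pvL residues ↔ ("K" ∈ residues ∨ "R" ∈ residues) := by
  rw [mem_pvL_iff]
  constructor
  · rintro ⟨r, hr, hm⟩
    simp only [pvTbl, List.mem_cons, List.not_mem_nil, or_false, Prod.mk.injEq] at hm
    rcases hm with ⟨rfl,h⟩|⟨rfl,h⟩|⟨rfl,h⟩|⟨rfl,h⟩|⟨rfl,h⟩|⟨rfl,h⟩|⟨rfl,h⟩|⟨rfl,h⟩|⟨rfl,h⟩|⟨rfl,h⟩|⟨rfl,h⟩|⟨rfl,h⟩|⟨rfl,h⟩|⟨rfl,h⟩|⟨rfl,h⟩|⟨rfl,h⟩|⟨rfl,h⟩ <;> tauto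
  · rintro (h|h)
    exact ⟨"K", h, by decide⟩
    exact ⟨"R", h, by decide⟩

theorem mem_pvL_four (residues : List String) :
    (4 : Int) ∈ pvL residues ↔ ("S" ∈ residues) := by
  rw [mem_pvL_iff]
  constructor
  · rintro ⟨r, hr, hm⟩
    simp only [pvTbl, List.mem_cons, List.not_mem_nil, or_false, Prod.mk.injEq] at hm
    rcases hm with ⟨rfl,h⟩|⟨rfl,h⟩|⟨rfl,h⟩|⟨rfl,h⟩|⟨rfl,h⟩|⟨rfl,h⟩|⟨rfl,h⟩|⟨rfl,h⟩|⟨rfl,h⟩|⟨rfl,h⟩|⟨rfl,h⟩|⟨rfl,h⟩|⟨rfl,h⟩|⟨rfl,h⟩|⟨rfl,h⟩|⟨rfl,h⟩|⟨rfl,h⟩ <;> tauto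
  · intro h; exact ⟨"S", h, by decide⟩

theorem mem_pvL_five (residues : List String) :
    (5 : Int) ∈ pvL residues ↔ ("T" ∈ residues) := by
  rw [mem_pvL_iff]
  constructor
  · rintro ⟨r, hr, hm⟩
    simp only [pvTbl, List.mem_cons, List.not_mem_nil, or_false, Prod.mk.injEq] at hm
    rcases hm with ⟨rfl,h⟩|⟨rfl,h⟩|⟨rfl,h⟩|⟨rfl,h⟩|⟨rfl,h⟩|⟨rfl,h⟩|⟨rfl,h⟩|⟨rfl,h⟩|⟨rfl,h⟩|⟨rfl,h⟩|⟨rfl,h⟩|⟨rfl,h⟩|⟨rfl,h⟩|⟨rfl,h⟩|⟨rfl,h⟩|⟨rfl,h⟩|⟨rfl,h⟩ <;> tauto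
  · intro h; exact ⟨"T", h, by decide⟩

theorem mem_pvL_six (residues : List String) :
    (6 : Int) ∈ pvL residues ↔ ("D" ∈ residues ∨ "E" ∈ residues) := by
  rw [mem_pvL_iff]
  constructor
  · rintro ⟨r, hr, hm⟩
    simp only [pvTbl, List.mem_cons, List.not_mem_nil, or_false, Prod.mk.injEq] at hm
    rcases hm with ⟨rfl,h⟩|⟨rfl,h⟩|⟨rfl,h⟩|⟨rfl,h⟩|⟨rfl,h⟩|⟨rfl,h⟩|⟨rfl,h⟩|⟨rfl,h⟩|⟨rfl,h⟩|⟨rfl,h⟩|⟨rfl,h⟩|⟨rfl,h⟩|⟨rfl,h⟩|⟨rfl,h⟩|⟨rfl,h⟩|⟨rfl,h⟩|⟨rfl,h⟩ <;> tauto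
  · rintro (h|h)
    exact ⟨"D", h, by decide⟩
    exact ⟨"E", h, by decide⟩

-- ===== VERDICT (by name: the statement is the Claim_ definition above) =====
theorem get_catalytic_class_spec : Claim_equal_get_catalytic_class := by
  intro residues _
  unfold Spec_get_catalytic_class get_catalytic_class
  simp only [List.any_cons, List.any_nil, Bool.or_false, Bool.or_eq_true,
    List.contains_iff_mem, List.any_eq_true, beq_iff_eq, exists_eq_right,
    show ("ILMVWF".toList = ['I','L','M','V','W','F']) from rfl,
    show ("AGP".toList = ['A','G','P']) from rfl,
    show ("QN".toList = ['Q','N']) from rfl,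
    show ("KR".toList = ['K','R']) from rfl,
    show ("DE".toList = ['D','E']) from rfl,
    show (String.ofList ['I'] = "I") from rfl, show (String.ofList ['L'] = "L") from rfl, show (String.ofList ['M'] = "M") from rfl, show (String.ofList ['V'] = "V") from rfl, show (String.ofList ['W'] = "W") from rfl, show (String.ofList ['F'] = "F") from rfl, show (String.ofList ['A'] = "A") from rfl, show (String.ofList ['G'] = "G") from rfl, show (String.ofList ['P'] = "P") from rfl, show (String.ofList ['Q'] = "Q") from rfl, show (String.ofList ['N'] = "N") from rfl, show (String.ofList ['K'] = "K") from rfl, show (String.ofList ['R'] = "R") from rfl, show (String.ofList ['D'] = "D") from rfl, show (String.ofList ['E'] = "E") from rfl]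
  split_ifs with h0 h1 h2 h3 h4 h5 h6
  · -- class 0
    refine (pvMinD_eq ?_ ?_).symm
    · rw [mem_pvL_zero]; exact h0
    · intro j hj; exact (pvL_range hj).1
  · -- class 1
    refine (pvMinD_eq ?_ ?_).symm
    · rw [mem_pvL_one]; exact h1
    · intro j hj
      obtain ⟨hr1, hr2⟩ := pvL_range hj
      by_contra hlt
      push Not at hlt
      interval_cases j <;>
        first
          | (exact h0 ((mem_pvL_zero residues).1 hj))
  · -- class 2
    refine (pvMinD_eq ?_ ?_).symm
    · rw [mem_pvL_two]; exact h2
    · intro j hj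
      obtain ⟨hr1, hr2⟩ := pvL_range hj
      by_contra hlt
      push Not at hlt
      interval_cases j <;>
        first
          | (exact h0 ((mem_pvL_zero residues).1 hj))
          | (exact h1 ((mem_pvL_one residues).1 hj))
  · -- class 3
    refine (pvMinD_eq ?_ ?_).symm
    · rw [mem_pvL_three]; exact h3
    · intro j hj
      obtain ⟨hr1, hr2⟩ := pvL_range hj
      by_contra hlt
      push Not at hlt
      interval_cases j <;>
        first
          | (exact h0 ((mem_pvL_zero residues).1 hj))
          | (exact h1 ((mem_pvL_one residues).1 hj))
          | (exact h2 ((mem_pvL_two residues).1 hj))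
  · -- class 4
    refine (pvMinD_eq ?_ ?_).symm
    · rw [mem_pvL_four]; exact h4
    · intro j hj
      obtain ⟨hr1, hr2⟩ := pvL_range hj
      by_contra hlt
      push Not at hlt
      interval_cases j <;>
        first
          | (exact h0 ((mem_pvL_zero residues).1 hj))
          | (exact h1 ((mem_pvL_one residues).1 hj))
          | (exact h2 ((mem_pvL_two residues).1 hj))
          | (exact h3 ((mem_pvL_three residues).1 hj))
  · -- class 5
    refine (pvMinD_eq ?_ ?_).symm
    · rw [mem_pvL_five]; exact h5
    · intro j hj
      obtain ⟨hr1, hr2⟩ := pvL_range hj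
      by_contra hlt
      push Not at hlt
      interval_cases j <;>
        first
          | (exact h0 ((mem_pvL_zero residues).1 hj))
          | (exact h1 ((mem_pvL_one residues).1 hj))
          | (exact h2 ((mem_pvL_two residues).1 hj))
          | (exact h3 ((mem_pvL_three residues).1 hj))
          | (exact h4 ((mem_pvL_four residues).1 hj))
  · -- class 6
    refine (pvMinD_eq ?_ ?_).symm
    · rw [mem_pvL_six]; exact h6
    · intro j hj
      obtain ⟨hr1, hr2⟩ := pvL_range hj
      by_contra hlt
      push Not at hlt
      interval_cases j <;>
        first
          | (exact h0 ((mem_pvL_zero residues).1 hj))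
          | (exact h1 ((mem_pvL_one residues).1 hj))
          | (exact h2 ((mem_pvL_two residues).1 hj))
          | (exact h3 ((mem_pvL_three residues).1 hj))
          | (exact h4 ((mem_pvL_four residues).1 hj))
          | (exact h5 ((mem_pvL_five residues).1 hj))
  · -- no catalytic residue present
    refine (pvMinD_empty ?_).symm
    intro j hj
    obtain ⟨hr1, hr2⟩ := pvL_range hj
    interval_cases j <;>
      first
        | (exact h0 ((mem_pvL_zero residues).1 hj))
        | (exact h1 ((mem_pvL_one residues).1 hj))
        | (exact h2 ((mem_pvL_two residues).1 hj))
        | (exact h3 ((mem_pvL_three residues).1 hj))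
        | (exact h4 ((mem_pvL_four residues).1 hj))
        | (exact h5 ((mem_pvL_five residues).1 hj))
        | (exact h6 ((mem_pvL_six residues).1 hj))
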